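-- pv_equiv track=rewrite | github.com/alnah005/raccoon_identification | box_compare.py | matchClosestCenters
-- ===== SOURCE A (Python) =====
-- def removeCenter(center,c_prefs):
--     return [[(a[0],a[1]) for a in k if a[0] != center] for k in c_prefs]
--
-- def matchClosestCenters(c_prefs):
--     selected = [0 for i in range(len(c_prefs))]
--     center1 = 0
--     center2 = 0
--     distance = 100000000000
--     result = []
--     while sum(selected) < len(c_prefs):
--         for i in range(len(selected)):
--             if (selected[i] == 0):
--                 if (len(c_prefs[i]) > 0):
--                     if (distance > c_prefs[i][0][1]):
--                         center1 = i
--                         center2 = c_prefs[i][0][0]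
--                         distance = c_prefs[i][0][1]
--                 else:
--                     selected[i] = 1
--                     result.append((i,None))
--         if (selected[center1]==0):
--             result.append((center1,center2))
--             distance = 100000000000
--             selected[center1] = 1
--             c_prefs = removeCenter(center2,c_prefs)
--
--     return result
-- ===== SOURCE B (Python) =====
-- def matchClosestCenters(c_prefs):
--     removed = set()
--     active = [(i, 0) for i in range(len(c_prefs))]
--     result = []
--     while active:
--         keep = []
--         best = None
--         for i, p in active:
--             lst = c_prefs[i]
--             while p < len(lst) and lst[p][0] in removed:
--                 p += 1
--             if p == len(lst):
--                 result.append((i, None))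
--             else:
--                 keep.append((i, p))
--                 if best is None or lst[p][1] < best[0]:
--                     best = (lst[p][1], i, lst[p][0])
--         if best is None:
--             break
--         _, bi, bc = best
--         result.append((bi, bc))
--         removed.add(bc)
--         active = [(i, p) for (i, p) in keep if i != bi]
--     return result
-- ===== Notes on version B (the rewrite author's own statement) =====
-- stated objective: faster
-- what changed: Instead of rebuilding every preference list with removeCenter after each match (full filter pass over all data per round), B keeps a set of removed centers and a lazy skip pointer per list, advancing each pointer past removed centers and scanning only current heads per round.
import Mathlib
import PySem

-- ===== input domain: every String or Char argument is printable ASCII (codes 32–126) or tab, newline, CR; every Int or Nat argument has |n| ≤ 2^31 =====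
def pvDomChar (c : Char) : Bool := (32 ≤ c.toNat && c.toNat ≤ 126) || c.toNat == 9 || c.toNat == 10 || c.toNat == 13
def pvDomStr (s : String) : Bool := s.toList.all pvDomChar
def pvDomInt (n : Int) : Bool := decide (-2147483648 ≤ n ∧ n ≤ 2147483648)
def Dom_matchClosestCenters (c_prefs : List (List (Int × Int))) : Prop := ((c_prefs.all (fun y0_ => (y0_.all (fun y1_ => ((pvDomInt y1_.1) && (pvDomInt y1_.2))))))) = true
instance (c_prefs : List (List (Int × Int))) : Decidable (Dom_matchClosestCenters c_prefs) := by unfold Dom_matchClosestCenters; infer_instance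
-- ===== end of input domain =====

-- B replaces A's per-round full rebuild of every preference list (removeCenter) by a
-- removed-set with lazy per-list skip pointers; return values are proved identical on Dom.

-- ===== PORT A =====
-- A-side state tuple: (selected, center1, center2, distance, result)
def removeCenter (center : Int) (c_prefs : List (List (Int × Int))) : List (List (Int × Int)) :=
  c_prefs.map (fun k => (k.filter (fun a => a.1 != center)).map (fun a => (a.1, a.2)))

def aPass (cp : List (List (Int × Int)))
    (st : List Int × Int × Int × Int × List (Int × Option Int)) (i : Nat) :
    List Int × Int × Int × Int × List (Int × Option Int) :=
  if st.1.getD i 0 == 0 then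
    match cp.getD i [] with
    | [] => (st.1.set i 1, st.2.1, st.2.2.1, st.2.2.2.1, st.2.2.2.2 ++ [((i : Int), none)])
    | a :: _ =>
      if st.2.2.2.1 > a.2 then (st.1, (i : Int), a.1, a.2, st.2.2.2.2) else st
  else st

-- fuel = (number of rounds needed) bound; it only makes the Python while-loop total
def aLoop : Nat → List Int → Int → Int → Int → List (Int × Option Int) →
    List (List (Int × Int)) → List (Int × Option Int)
  | 0, _, _, _, _, res, _ => res
  | fuel+1, sel, c1, c2, dist, res, cp =>
    if sel.sum < (cp.length : Int) then
      let st := (List.range sel.length).foldl (aPass cp) (sel, c1, c2, dist, res)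
      if st.1.getD st.2.1.toNat 0 == 0 then
        aLoop fuel (st.1.set st.2.1.toNat 1) st.2.1 st.2.2.1 100000000000
          (st.2.2.2.2 ++ [(st.2.1, some st.2.2.1)]) (removeCenter st.2.2.1 cp)
      else
        aLoop fuel st.1 st.2.1 st.2.2.1 st.2.2.2.1 st.2.2.2.2 cp
    else res

def matchClosestCenters (c_prefs : List (List (Int × Int))) : List (Int × Option Int) :=
  aLoop (c_prefs.length + 1) (List.replicate c_prefs.length 0) 0 0 100000000000 [] c_prefs

-- ===== PORT B =====
-- skip pointer past centers already matched (the `while p < len(lst) and lst[p][0] in removed`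
-- loop; the fuel argument lst.length - p only makes the loop total)
def skipPosGo (removed : List Int) (lst : List (Int × Int)) : Nat → Nat → Nat
  | 0, p => p
  | fuel+1, p =>
    if h : p < lst.length then
      if PySem.Set.contains removed lst[p].1 then skipPosGo removed lst fuel (p+1) else p
    else p

def skipPos (removed : List Int) (lst : List (Int × Int)) (p : Nat) : Nat :=
  skipPosGo removed lst (lst.length - p) p

-- B-side fold state: (keep, best, result)
def bStep (cp : List (List (Int × Int))) (removed : List Int)
    (st : List (Int × Nat) × Option (Int × Int × Int) × List (Int × Option Int))
    (ip : Int × Nat) :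
    List (Int × Nat) × Option (Int × Int × Int) × List (Int × Option Int) :=
  let lst := cp.getD ip.1.toNat []
  let p := skipPos removed lst ip.2
  if p == lst.length then (st.1, st.2.1, st.2.2 ++ [(ip.1, none)])
  else
    let a := lst.getD p ((0 : Int), (0 : Int))
    let best' :=
      match st.2.1 with
      | none => some (a.2, ip.1, a.1)
      | some b => if a.2 < b.1 then some (a.2, ip.1, a.1) else some b
    (st.1 ++ [(ip.1, p)], best', st.2.2)

def bLoop (cp : List (List (Int × Int))) : Nat → List Int → List (Int × Nat) →
    List (Int × Option Int) → List (Int × Option Int)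
  | 0, _, _, res => res
  | fuel+1, removed, active, res =>
    if active.isEmpty then res else
    let st := active.foldl (bStep cp removed) ([], none, res)
    match st.2.1 with
    | none => st.2.2
    | some b =>
      bLoop cp fuel (PySem.Set.add removed b.2.2) (st.1.filter (fun ip => ip.1 != b.2.1))
        (st.2.2 ++ [(b.2.1, some b.2.2)])

def matchClosestCenters_alt (c_prefs : List (List (Int × Int))) : List (Int × Option Int) :=
  bLoop c_prefs (c_prefs.length + 1) []
    ((List.range c_prefs.length).map (fun i => ((i : Int), (0 : Nat)))) []

-- ===== PRECONDITION & SPEC =====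
def Spec_matchClosestCenters (c_prefs : List (List (Int × Int))) (out : List (Int × Option Int)) : Prop := out = matchClosestCenters_alt c_prefs
instance (c_prefs : List (List (Int × Int))) (out : List (Int × Option Int)) : Decidable (Spec_matchClosestCenters c_prefs out) := by unfold Spec_matchClosestCenters; infer_instance

-- ===== CLAIM (what is proved, stated in full; the proofs are below) =====
def Claim_equal_matchClosestCenters : Prop := ∀ (c_prefs : List (List (Int × Int))), Dom_matchClosestCenters c_prefs → Spec_matchClosestCenters c_prefs (matchClosestCenters c_prefs)


-- ===== LEMMAS AND PROOFS =====

-- all second components (distances) are below A's sentinel 100000000000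
def BoundOk (orig : List (List (Int × Int))) : Prop :=
  ∀ l ∈ orig, ∀ a ∈ l, a.2 < 100000000000

def filt (removed : List Int) (l : List (Int × Int)) : List (Int × Int) :=
  l.filter (fun a => !(PySem.Set.contains removed a.1))

-- relation between A's selected flags and B's active pointer list, over an index list l
inductive ActRel (sel : List Int) (removed : List Int) (orig : List (List (Int × Int))) :
    List Nat → List (Int × Nat) → Prop
  | nil : ActRel sel removed orig [] []
  | skip {i l act} : sel.getD i 0 ≠ 0 → ActRel sel removed orig l act →
      ActRel sel removed orig (i :: l) act
  | cons {i p l act} : sel.getD i 0 = 0 → p ≤ (orig.getD i []).length →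
      (∀ a ∈ (orig.getD i []).take p, PySem.Set.contains removed a.1 = true) →
      ActRel sel removed orig l act →
      ActRel sel removed orig (i :: l) (((i : Int), p) :: act)

-- relation between A's (center1, center2, distance) and B's best candidate
def BRel (n : Nat) (l : List Nat) (sel : List Int) (c1 c2 dist : Int) :
    Option (Int × Int × Int) → Prop
  | none => dist = 100000000000
  | some b => ∃ j : Nat, c1 = (j : Int) ∧ j < n ∧ j ∉ l ∧ sel.getD j 0 = 0 ∧
      b = (dist, c1, c2)


theorem getD_set_self (l : List Int) (j : Nat) (v : Int) (h : j < l.length) :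
    (l.set j v).getD j 0 = v := by
  have h' : j < (l.set j v).length := by simpa using h
  rw [List.getD_eq_getElem _ _ h', List.getElem_set_self]

theorem getD_set_ne (l : List Int) (i j : Nat) (v : Int) (h : i ≠ j) :
    (l.set i v).getD j 0 = l.getD j 0 := by
  simp [List.getD, h]

theorem getD_map_filt (removed : List Int) (xs : List (List (Int × Int))) (i : Nat)
    (h : i < xs.length) : (xs.map (filt removed)).getD i [] = filt removed (xs.getD i []) := by
  have hm : i < (xs.map (filt removed)).length := by simpa using h
  rw [List.getD_eq_getElem _ _ hm, List.getD_eq_getElem _ _ h, List.getElem_map]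

theorem skipPosGo_spec (removed : List Int) (lst : List (Int × Int)) :
    ∀ (fuel p : Nat), lst.length - p ≤ fuel →
    (∀ a ∈ lst.take p, PySem.Set.contains removed a.1 = true) → p ≤ lst.length →
    (skipPosGo removed lst fuel p ≤ lst.length ∧
     (∀ a ∈ lst.take (skipPosGo removed lst fuel p), PySem.Set.contains removed a.1 = true) ∧
     (∀ h : skipPosGo removed lst fuel p < lst.length,
       PySem.Set.contains removed (lst[skipPosGo removed lst fuel p]).1 = false)) := by
  intro fuel
  induction fuel with
  | zero =>
    intro p hf htake hp
    rw [show skipPosGo removed lst 0 p = p from rfl]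
    exact ⟨hp, htake, fun h => absurd h (by omega)⟩
  | succ fuel ih =>
    intro p hf htake hp
    show (skipPosGo removed lst (fuel+1) p ≤ lst.length ∧ _ ∧ _)
    rw [skipPosGo]
    by_cases hlt : p < lst.length
    · rw [dif_pos hlt]
      by_cases hc : PySem.Set.contains removed lst[p].1 = true
      · rw [if_pos hc]
        apply ih (p + 1) (by omega) ?_ (by omega)
        intro a ha
        rw [List.take_add_one] at ha
        rcases List.mem_append.mp ha with h | h
        · exact htake a h
        · have hg : lst[p]? = some lst[p] := List.getElem?_eq_getElem hlt
          rw [hg] at h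
          simp at h
          rw [h]; exact hc
      · rw [if_neg hc]
        exact ⟨hp, htake, fun _ => by simpa using hc⟩
    · rw [dif_neg hlt]
      exact ⟨hp, htake, fun h => absurd h hlt⟩

theorem skipPos_spec (removed : List Int) (lst : List (Int × Int)) (p : Nat)
    (htake : ∀ a ∈ lst.take p, PySem.Set.contains removed a.1 = true) (hp : p ≤ lst.length) :
    skipPos removed lst p ≤ lst.length ∧
    (∀ a ∈ lst.take (skipPos removed lst p), PySem.Set.contains removed a.1 = true) ∧
    (∀ h : skipPos removed lst p < lst.length,
      PySem.Set.contains removed (lst[skipPos removed lst p]).1 = false) :=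
  skipPosGo_spec removed lst (lst.length - p) p (le_refl _) htake hp

theorem filt_eq_drop (removed : List Int) (lst : List (Int × Int)) (p : Nat)
    (h : ∀ a ∈ lst.take p, PySem.Set.contains removed a.1 = true) :
    filt removed lst = filt removed (lst.drop p) := by
  conv_lhs => rw [← List.take_append_drop p lst]
  unfold filt
  rw [List.filter_append]
  have h0 : (lst.take p).filter (fun a => !(PySem.Set.contains removed a.1)) = [] :=
    List.filter_eq_nil_iff.mpr (fun a ha => by
      have hm := (PySem.Set.contains_iff removed a.1).mp (h a ha)
      simp [hm])
  rw [h0, List.nil_append]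

theorem contains_add_eq (s : List Int) (bc x : Int) :
    PySem.Set.contains (PySem.Set.add s bc) x = (PySem.Set.contains s x || x == bc) := by
  by_cases h1 : x ∈ s <;> by_cases h2 : x = bc <;>
    simp [PySem.Set.contains_iff, PySem.Set.mem_add, h1, h2]

theorem removeCenter_filt (bc : Int) (removed : List Int) (orig : List (List (Int × Int))) :
    removeCenter bc (orig.map (filt removed)) = orig.map (filt (PySem.Set.add removed bc)) := by
  unfold removeCenter
  rw [List.map_map]
  apply List.map_congr_left
  intro k _
  show ((filt removed k).filter (fun a => a.1 != bc)).map (fun a => (a.1, a.2)) =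
    filt (PySem.Set.add removed bc) k
  have hmap : ∀ m : List (Int × Int), m.map (fun a => (a.1, a.2)) = m := by
    intro m; simp
  rw [hmap]
  unfold filt
  rw [List.filter_filter]
  apply List.filter_congr
  intro a _
  rw [contains_add_eq]
  cases h1 : PySem.Set.contains removed a.1 <;> cases h2 : a.1 == bc <;>
    simp [bne, h2]

theorem map_filt_nil (orig : List (List (Int × Int))) : orig.map (filt []) = orig := by
  have h : ∀ l, filt [] l = l := by
    intro l
    unfold filt
    apply List.filter_eq_self.mpr
    intro a _
    simp
  rw [show filt [] = id from funext h, List.map_id]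

theorem contains_add_mono (s : List Int) (bc x : Int)
    (h : PySem.Set.contains s x = true) : PySem.Set.contains (PySem.Set.add s bc) x = true := by
  rw [contains_add_eq, h]
  rfl

theorem ActRel_mono {sel removed removed' : List Int} {orig : List (List (Int × Int))}
    {l : List Nat} {act : List (Int × Nat)}
    (hsub : ∀ x, PySem.Set.contains removed x = true → PySem.Set.contains removed' x = true)
    (h : ActRel sel removed orig l act) : ActRel sel removed' orig l act := by
  induction h with
  | nil => exact .nil
  | skip h0 _ ih => exact .skip h0 ih
  | cons h0 hp ht _ ih => exact .cons h0 hp (fun a ha => hsub _ (ht a ha)) ih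

theorem ActRel_congr {sel sel' removed : List Int} {orig : List (List (Int × Int))}
    {l : List Nat} {act : List (Int × Nat)}
    (h : ActRel sel removed orig l act) :
    (∀ i ∈ l, sel'.getD i 0 = sel.getD i 0) → ActRel sel' removed orig l act := by
  induction h with
  | nil => intro _; exact .nil
  | @skip i l act h0 _ ih =>
    intro hsel
    exact .skip (by rw [hsel i (by simp)]; exact h0) (ih fun j hj => hsel j (by simp [hj]))
  | @cons i p l act h0 hp ht _ ih =>
    intro hsel
    exact .cons (by rw [hsel i (by simp)]; exact h0) hp ht (ih fun j hj => hsel j (by simp [hj]))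

theorem ActRel_set_filter {sel removed : List Int} {orig : List (List (Int × Int))}
    {l : List Nat} {act : List (Int × Nat)} (j : Nat) (hj : j < sel.length)
    (h : ActRel sel removed orig l act) :
    ActRel (sel.set j 1) removed orig l (act.filter (fun ip => ip.1 != (j : Int))) := by
  induction h with
  | nil => exact .nil
  | @skip i l act h0 _ ih =>
    refine .skip ?_ ih
    by_cases hij : i = j
    · rw [hij, getD_set_self _ _ _ hj]; omega
    · rw [getD_set_ne _ _ _ _ (fun he => hij he.symm)]
      · exact h0
  | @cons i p l act h0 hp ht _ ih =>
    by_cases hij : i = j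
    · subst hij
      have hfe : List.filter (fun ip => ip.1 != ((i : Nat) : Int)) ((((i : Nat) : Int), p) :: act)
          = List.filter (fun ip => ip.1 != ((i : Nat) : Int)) act := by
        simp [List.filter_cons]
      rw [hfe]
      refine .skip ?_ ih
      rw [getD_set_self _ _ _ hj]; omega
    · have hfe : List.filter (fun ip => ip.1 != ((j : Nat) : Int)) ((((i : Nat) : Int), p) :: act)
          = (((i : Nat) : Int), p) :: List.filter (fun ip => ip.1 != ((j : Nat) : Int)) act := by
        simp [List.filter_cons, hij]
      rw [hfe]
      refine .cons ?_ hp ht ih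
      rw [getD_set_ne _ _ _ _ (fun he => hij (by omega))]
      exact h0

theorem ActRel_nil_of_selected {sel removed : List Int} {orig : List (List (Int × Int))}
    {l : List Nat} {act : List (Int × Nat)}
    (h : ActRel sel removed orig l act) :
    (∀ i ∈ l, sel.getD i 0 ≠ 0) → act = [] := by
  induction h with
  | nil => intro _; rfl
  | @skip i l act _ _ ih => intro hs; exact ih (fun j hj => hs j (by simp [hj]))
  | @cons i p l act h0 _ _ _ _ => intro hs; exact absurd h0 (hs i (by simp))

theorem ActRel_ne_nil {sel removed : List Int} {orig : List (List (Int × Int))}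
    {l : List Nat} {act : List (Int × Nat)} {i : Nat}
    (h : ActRel sel removed orig l act) : i ∈ l → sel.getD i 0 = 0 → act ≠ [] := by
  induction h with
  | nil => intro hi; simp at hi
  | @skip i' l act h0 _ ih =>
    intro hi h0'
    rcases List.mem_cons.mp hi with he | ht
    · rw [he] at h0'; exact absurd h0' h0
    · exact ih ht h0'
  | @cons i' p l act _ _ _ _ _ => intro _ _; simp

theorem ActRel_init (orig : List (List (Int × Int))) (sel : List Int) (l : List Nat)
    (h : ∀ i ∈ l, sel.getD i 0 = 0) :
    ActRel sel [] orig l (l.map (fun i => ((i : Int), (0 : Nat)))) := by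
  induction l with
  | nil => exact .nil
  | cons i t ih =>
    exact .cons (h i (by simp)) (Nat.zero_le _) (by simp)
      (ih fun j hj => h j (by simp [hj]))

theorem sum01_le (sel : List Int) (h : ∀ x ∈ sel, x = 0 ∨ x = 1) :
    sel.sum ≤ (sel.length : Int) := by
  induction sel with
  | nil => simp
  | cons a l ih =>
    have ha := h a (by simp)
    have hl := ih (fun x hx => h x (by simp [hx]))
    simp only [List.sum_cons, List.length_cons]
    push_cast
    omega

theorem sum01_lt_iff (sel : List Int) (h : ∀ x ∈ sel, x = 0 ∨ x = 1) :
    sel.sum < (sel.length : Int) ↔ ∃ i, i < sel.length ∧ sel.getD i 0 = 0 := by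
  induction sel with
  | nil => simp
  | cons a l ih =>
    have ha := h a (by simp)
    have ihl := ih (fun x hx => h x (by simp [hx]))
    have hle := sum01_le l (fun x hx => h x (by simp [hx]))
    constructor
    · intro hlt
      rcases ha with h0 | h1
      · exact ⟨0, by simp, by simp [h0]⟩
      · have hsl : l.sum < (l.length : Int) := by
          simp only [List.sum_cons, List.length_cons, h1] at hlt
          push_cast at hlt
          omega
        obtain ⟨i, hi, hgd⟩ := ihl.mp hsl
        exact ⟨i + 1, by simp; omega, by simpa [List.getD_cons_succ] using hgd⟩
    · rintro ⟨i, hi, hgd⟩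
      cases i with
      | zero =>
        rw [List.getD_cons_zero] at hgd
        simp only [List.sum_cons, List.length_cons, hgd]
        push_cast
        omega
      | succ i' =>
        have hsl : l.sum < (l.length : Int) :=
          ihl.mpr ⟨i', by simpa using hi, by simpa using hgd⟩
        simp only [List.sum_cons, List.length_cons]
        push_cast
        rcases ha with h0 | h1 <;> omega

theorem count0_pos (sel : List Int) (j : Nat) (hj : j < sel.length)
    (h : sel.getD j 0 = 0) : 0 < sel.count 0 := by
  rw [List.getD_eq_getElem _ _ hj] at h
  have : (0 : Int) ∈ sel := h ▸ List.getElem_mem hj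
  exact List.count_pos_iff.mpr this

theorem count0_set (sel : List Int) (j : Nat) (hj : j < sel.length)
    (h : sel.getD j 0 = 0) : (sel.set j 1).count 0 + 1 = sel.count 0 := by
  induction sel generalizing j with
  | nil => simp at hj
  | cons a l ih =>
    cases j with
    | zero =>
      rw [List.getD_cons_zero] at h
      subst h
      simp [List.count_cons]
    | succ j' =>
      rw [List.getD_cons_succ] at h
      have := ih j' (by simpa using hj) h
      simp only [List.set_cons_succ, List.count_cons]
      omega

theorem BRel_anti {n : Nat} {l t : List Nat} {sel : List Int} {c1 c2 dist : Int}
    {b : Option (Int × Int × Int)} (hsub : ∀ j, j ∈ t → j ∈ l)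
    (h : BRel n l sel c1 c2 dist b) : BRel n t sel c1 c2 dist b := by
  cases b with
  | none => exact h
  | some b =>
    obtain ⟨j, h1, h2, h3, h4, h5⟩ := h
    exact ⟨j, h1, h2, fun hj => h3 (hsub j hj), h4, h5⟩

def PassConcl (orig : List (List (Int × Int))) (removed : List Int) (l : List Nat)
    (act : List (Int × Nat)) (sel : List Int) (c1 c2 dist : Int)
    (res : List (Int × Option Int)) (keep0 : List (Int × Nat))
    (best0 : Option (Int × Int × Int)) : Prop :=
  let A := List.foldl (aPass (orig.map (filt removed))) (sel, c1, c2, dist, res) l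
  let B := List.foldl (bStep orig removed) (keep0, best0, res) act
  A.2.2.2.2 = B.2.2 ∧
  (∃ k', B.1 = keep0 ++ k' ∧ ActRel A.1 removed orig l k') ∧
  BRel orig.length [] A.1 A.2.1 A.2.2.1 A.2.2.2.1 B.2.1 ∧
  A.1.length = sel.length ∧
  (∀ j, j ∉ l → A.1.getD j 0 = sel.getD j 0) ∧
  (∀ x ∈ A.1, x = 0 ∨ x = 1) ∧
  A.1.count 0 ≤ sel.count 0 ∧
  (B.2.1 = none → best0 = none ∧ A.2.1 = c1 ∧ A.2.2.1 = c2 ∧ A.2.2.2.1 = dist ∧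
    ∀ i ∈ l, A.1.getD i 0 ≠ 0)

theorem pass_eq (orig : List (List (Int × Int))) (removed : List Int) (hB : BoundOk orig)
    (l : List Nat) :
    ∀ (act : List (Int × Nat)) (sel : List Int) (c1 c2 dist : Int)
      (res : List (Int × Option Int)) (keep0 : List (Int × Nat))
      (best0 : Option (Int × Int × Int)),
    l.Nodup → (∀ i ∈ l, i < orig.length) → sel.length = orig.length →
    (∀ x ∈ sel, x = 0 ∨ x = 1) →
    ActRel sel removed orig l act →
    BRel orig.length l sel c1 c2 dist best0 →
    PassConcl orig removed l act sel c1 c2 dist res keep0 best0 := by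
  induction l with
  | nil =>
    intro act sel c1 c2 dist res keep0 best0 _ _ _ h01 hact hbrel
    cases hact
    unfold PassConcl
    exact ⟨rfl, ⟨[], by simp, ActRel.nil⟩, hbrel, rfl, fun j _ => rfl, h01, le_refl _,
      fun hn => ⟨hn, rfl, rfl, rfl, by simp⟩⟩
  | cons i t ih =>
    intro act sel c1 c2 dist res keep0 best0 hnd hbnd hlen h01 hact hbrel
    have hit : i ∉ t := (List.nodup_cons.mp hnd).1
    have hndt : t.Nodup := (List.nodup_cons.mp hnd).2
    have hin : i < orig.length := hbnd i (by simp)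
    have hisel : i < sel.length := by omega
    have hbndt : ∀ j ∈ t, j < orig.length := fun j hj => hbnd j (by simp [hj])
    have hcp : (orig.map (filt removed)).getD i [] = filt removed (orig.getD i []) :=
      getD_map_filt removed orig i hin
    cases hact with
    | skip h0 hrec =>
      unfold PassConcl
      simp only [List.foldl_cons]
      have hstepA : aPass (orig.map (filt removed)) (sel, c1, c2, dist, res) i
          = (sel, c1, c2, dist, res) := by
        unfold aPass
        rw [if_neg (by simp only [beq_iff_eq]; exact h0)]
      rw [hstepA]
      have hP := ih act sel c1 c2 dist res keep0 best0 hndt hbndt hlen h01 hrec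
        (BRel_anti (fun j hj => by simp [hj]) hbrel)
      unfold PassConcl at hP
      obtain ⟨hres, ⟨k', hk1, hk2⟩, hbr, hlen', hout, h01', hcnt, hnone⟩ := hP
      refine ⟨hres, ⟨k', hk1, ActRel.skip ?_ hk2⟩, hbr, hlen', ?_, h01', hcnt, ?_⟩
      · rw [hout i hit]; exact h0
      · intro j hj; exact hout j (fun hjt => hj (by simp [hjt]))
      · intro hn
        obtain ⟨hb0, hc1, hc2, hd, hall⟩ := hnone hn
        refine ⟨hb0, hc1, hc2, hd, ?_⟩
        intro i' hi'
        rcases List.mem_cons.mp hi' with he | ht'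
        · rw [he, hout i hit]; exact h0
        · exact hall i' ht'
    | cons h0 hp htake hrec =>
      rename_i p act'
      have hq := skipPos_spec removed (orig.getD i []) p htake hp
      obtain ⟨hqle, htakeQ, hheadQ⟩ := hq
      by_cases hqe : skipPos removed (orig.getD i []) p = (orig.getD i []).length
      · -- list exhausted after skipping: A sees an empty filtered list, B emits None
        have hfilt0 : filt removed (orig.getD i []) = [] := by
          rw [filt_eq_drop removed (orig.getD i []) _ htakeQ, hqe, List.drop_length]
          rfl
        have hstepA : aPass (orig.map (filt removed)) (sel, c1, c2, dist, res) i
            = (sel.set i 1, c1, c2, dist, res ++ [((i : Int), none)]) := by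
          unfold aPass
          rw [if_pos (by simp only [beq_iff_eq]; exact h0), hcp, hfilt0]
        have hstepB : bStep orig removed (keep0, best0, res) ((i : Int), p)
            = (keep0, best0, res ++ [((i : Int), none)]) := by
          unfold bStep
          simp only [Int.toNat_natCast]
          rw [if_pos (by simp only [beq_iff_eq]; exact hqe)]
        unfold PassConcl
        simp only [List.foldl_cons]
        rw [hstepA, hstepB]
        have h01' : ∀ x ∈ sel.set i 1, x = 0 ∨ x = 1 := by
          intro x hx
          rcases List.mem_or_eq_of_mem_set hx with h | h
          · exact h01 x h
          · exact Or.inr h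
        have hact' : ActRel (sel.set i 1) removed orig t act' :=
          ActRel_congr hrec (fun j hj => getD_set_ne sel i j 1 (fun he => hit (he ▸ hj)))
        have hbrel' : BRel orig.length t (sel.set i 1) c1 c2 dist best0 := by
          cases best0 with
          | none => exact hbrel
          | some b =>
            obtain ⟨j, e1, e2, e3, e4, e5⟩ := hbrel
            refine ⟨j, e1, e2, fun hj => e3 (by simp [hj]), ?_, e5⟩
            rw [getD_set_ne sel i j 1 (fun he => e3 (by simp [← he]))]
            exact e4
        have hP := ih act' (sel.set i 1) c1 c2 dist (res ++ [((i : Int), none)]) keep0 best0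
          hndt hbndt (by simpa using hlen) h01' hact' hbrel'
        unfold PassConcl at hP
        obtain ⟨hres, ⟨k', hk1, hk2⟩, hbr, hlen', hout, h01'', hcnt, hnone⟩ := hP
        have houti : (List.foldl (aPass (orig.map (filt removed)))
            (sel.set i 1, c1, c2, dist, res ++ [((i : Int), none)]) t).1.getD i 0 = 1 := by
          rw [hout i hit, getD_set_self sel i 1 hisel]
        refine ⟨hres, ⟨k', hk1, ActRel.skip (by rw [houti]; omega) hk2⟩, hbr, ?_, ?_, h01'', ?_, ?_⟩
        · rw [hlen']; simp
        · intro j hj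
          have hji : j ≠ i := fun he => hj (by simp [he])
          rw [hout j (fun hjt => hj (by simp [hjt])), getD_set_ne sel i j 1 (fun he => hji he.symm)]
        · have := count0_set sel i hisel h0
          omega
        · intro hn
          obtain ⟨hb0, hc1', hc2', hd', hall⟩ := hnone hn
          refine ⟨hb0, hc1', hc2', hd', ?_⟩
          intro i' hi'
          rcases List.mem_cons.mp hi' with he | ht'
          · rw [he, houti]; omega
          · exact hall i' ht'
      · -- a surviving head: both sides see the same candidate pair
        have hqlt : skipPos removed (orig.getD i []) p < (orig.getD i []).length := by
          omega
        have hhead := hheadQ hqlt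
        have hfilt1 : filt removed (orig.getD i [])
            = (orig.getD i [])[skipPos removed (orig.getD i []) p] ::
              filt removed ((orig.getD i []).drop (skipPos removed (orig.getD i []) p + 1)) := by
          rw [filt_eq_drop removed (orig.getD i []) _ htakeQ, List.drop_eq_getElem_cons hqlt]
          unfold filt
          have hb : (!PySem.Set.contains removed
              (orig.getD i [])[skipPos removed (orig.getD i []) p].1) = true := by
            rw [hhead]
            rfl
          simp only [List.filter_cons, hb, if_true]
        have hgetD : (orig.getD i []).getD (skipPos removed (orig.getD i []) p) ((0 : Int), (0 : Int))
            = (orig.getD i [])[skipPos removed (orig.getD i []) p] :=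
          List.getD_eq_getElem _ _ hqlt
        have hmemo : orig.getD i [] ∈ orig := by
          rw [List.getD_eq_getElem orig [] hin]
          exact List.getElem_mem hin
        have hbound : (orig.getD i [])[skipPos removed (orig.getD i []) p].2 < 100000000000 :=
          hB _ hmemo _ (List.getElem_mem hqlt)
        -- common pieces for the ih call
        have hcons_keep : ∀ (selF : List Int) (k' : List (Int × Nat)),
            selF.getD i 0 = sel.getD i 0 →
            ActRel selF removed orig t k' →
            ActRel selF removed orig (i :: t)
              (((i : Int), skipPos removed (orig.getD i []) p) :: k') := by
          intro selF k' hgd hAR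
          exact ActRel.cons (by rw [hgd]; exact h0) (le_of_lt hqlt) htakeQ hAR
        cases best0 with
        | none =>
          have hd : dist = 100000000000 := hbrel
          have hcmp : (orig.getD i [])[skipPos removed (orig.getD i []) p].2 < dist := by
            omega
          have hstepA : aPass (orig.map (filt removed)) (sel, c1, c2, dist, res) i
              = (sel, (i : Int), (orig.getD i [])[skipPos removed (orig.getD i []) p].1,
                 (orig.getD i [])[skipPos removed (orig.getD i []) p].2, res) := by
            unfold aPass
            rw [if_pos (by simp only [beq_iff_eq]; exact h0), hcp, hfilt1]
            simp only [gt_iff_lt]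
            rw [if_pos hcmp]
          have hstepB : bStep orig removed (keep0, none, res) ((i : Int), p)
              = (keep0 ++ [((i : Int), skipPos removed (orig.getD i []) p)],
                 some ((orig.getD i [])[skipPos removed (orig.getD i []) p].2, (i : Int),
                   (orig.getD i [])[skipPos removed (orig.getD i []) p].1), res) := by
            unfold bStep
            simp only [Int.toNat_natCast]
            rw [if_neg (by simp only [beq_iff_eq]; exact hqe)]
            simp only [hgetD]
          unfold PassConcl
          simp only [List.foldl_cons]
          rw [hstepA, hstepB]
          have hbrel' : BRel orig.length t sel (i : Int)
              (orig.getD i [])[skipPos removed (orig.getD i []) p].1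
              (orig.getD i [])[skipPos removed (orig.getD i []) p].2
              (some ((orig.getD i [])[skipPos removed (orig.getD i []) p].2, (i : Int),
                (orig.getD i [])[skipPos removed (orig.getD i []) p].1)) :=
            ⟨i, rfl, hin, hit, h0, rfl⟩
          have hP := ih act' sel (i : Int)
            (orig.getD i [])[skipPos removed (orig.getD i []) p].1
            (orig.getD i [])[skipPos removed (orig.getD i []) p].2 res
            (keep0 ++ [((i : Int), skipPos removed (orig.getD i []) p)])
            (some ((orig.getD i [])[skipPos removed (orig.getD i []) p].2, (i : Int),
              (orig.getD i [])[skipPos removed (orig.getD i []) p].1))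
            hndt hbndt hlen h01 hrec hbrel'
          unfold PassConcl at hP
          obtain ⟨hres, ⟨k', hk1, hk2⟩, hbr, hlen', hout, h01'', hcnt, hnone⟩ := hP
          refine ⟨hres, ⟨((i : Int), skipPos removed (orig.getD i []) p) :: k', by
            rw [hk1]; simp, hcons_keep _ _ (hout i hit) hk2⟩, hbr, hlen', ?_, h01'', hcnt, ?_⟩
          · intro j hj
            exact hout j (fun hjt => hj (by simp [hjt]))
          · intro hn
            exact absurd (hnone hn).1 (by simp)
        | some b =>
          obtain ⟨j, e1, e2, e3, e4, e5⟩ := hbrel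
          subst e5
          by_cases hcmp : (orig.getD i [])[skipPos removed (orig.getD i []) p].2 < dist
          · have hstepA : aPass (orig.map (filt removed)) (sel, c1, c2, dist, res) i
                = (sel, (i : Int), (orig.getD i [])[skipPos removed (orig.getD i []) p].1,
                   (orig.getD i [])[skipPos removed (orig.getD i []) p].2, res) := by
              unfold aPass
              rw [if_pos (by simp only [beq_iff_eq]; exact h0), hcp, hfilt1]
              simp only [gt_iff_lt]
              rw [if_pos hcmp]
            have hstepB : bStep orig removed (keep0, some (dist, c1, c2), res) ((i : Int), p)
                = (keep0 ++ [((i : Int), skipPos removed (orig.getD i []) p)],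
                   some ((orig.getD i [])[skipPos removed (orig.getD i []) p].2, (i : Int),
                     (orig.getD i [])[skipPos removed (orig.getD i []) p].1), res) := by
              unfold bStep
              simp only [Int.toNat_natCast]
              rw [if_neg (by simp only [beq_iff_eq]; exact hqe)]
              simp only [hgetD]
              rw [if_pos hcmp]
            unfold PassConcl
            simp only [List.foldl_cons]
            rw [hstepA, hstepB]
            have hbrel' : BRel orig.length t sel (i : Int)
                (orig.getD i [])[skipPos removed (orig.getD i []) p].1
                (orig.getD i [])[skipPos removed (orig.getD i []) p].2
                (some ((orig.getD i [])[skipPos removed (orig.getD i []) p].2, (i : Int),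
                  (orig.getD i [])[skipPos removed (orig.getD i []) p].1)) :=
              ⟨i, rfl, hin, hit, h0, rfl⟩
            have hP := ih act' sel (i : Int)
              (orig.getD i [])[skipPos removed (orig.getD i []) p].1
              (orig.getD i [])[skipPos removed (orig.getD i []) p].2 res
              (keep0 ++ [((i : Int), skipPos removed (orig.getD i []) p)])
              (some ((orig.getD i [])[skipPos removed (orig.getD i []) p].2, (i : Int),
                (orig.getD i [])[skipPos removed (orig.getD i []) p].1))
              hndt hbndt hlen h01 hrec hbrel'
            unfold PassConcl at hP
            obtain ⟨hres, ⟨k', hk1, hk2⟩, hbr, hlen', hout, h01'', hcnt, hnone⟩ := hP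
            refine ⟨hres, ⟨((i : Int), skipPos removed (orig.getD i []) p) :: k', by
              rw [hk1]; simp, hcons_keep _ _ (hout i hit) hk2⟩, hbr, hlen', ?_, h01'', hcnt, ?_⟩
            · intro j' hj'
              exact hout j' (fun hjt => hj' (by simp [hjt]))
            · intro hn
              exact absurd (hnone hn).1 (by simp)
          · have hstepA : aPass (orig.map (filt removed)) (sel, c1, c2, dist, res) i
                = (sel, c1, c2, dist, res) := by
              unfold aPass
              rw [if_pos (by simp only [beq_iff_eq]; exact h0), hcp, hfilt1]
              simp only [gt_iff_lt]
              rw [if_neg hcmp]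
            have hstepB : bStep orig removed (keep0, some (dist, c1, c2), res) ((i : Int), p)
                = (keep0 ++ [((i : Int), skipPos removed (orig.getD i []) p)],
                   some (dist, c1, c2), res) := by
              unfold bStep
              simp only [Int.toNat_natCast]
              rw [if_neg (by simp only [beq_iff_eq]; exact hqe)]
              simp only [hgetD]
              rw [if_neg hcmp]
            unfold PassConcl
            simp only [List.foldl_cons]
            rw [hstepA, hstepB]
            have hbrel' : BRel orig.length t sel c1 c2 dist (some (dist, c1, c2)) :=
              ⟨j, e1, e2, fun hj => e3 (by simp [hj]), e4, rfl⟩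
            have hP := ih act' sel c1 c2 dist res
              (keep0 ++ [((i : Int), skipPos removed (orig.getD i []) p)])
              (some (dist, c1, c2))
              hndt hbndt hlen h01 hrec hbrel'
            unfold PassConcl at hP
            obtain ⟨hres, ⟨k', hk1, hk2⟩, hbr, hlen', hout, h01'', hcnt, hnone⟩ := hP
            refine ⟨hres, ⟨((i : Int), skipPos removed (orig.getD i []) p) :: k', by
              rw [hk1]; simp, hcons_keep _ _ (hout i hit) hk2⟩, hbr, hlen', ?_, h01'', hcnt, ?_⟩
            · intro j' hj'
              exact hout j' (fun hjt => hj' (by simp [hjt]))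
            · intro hn
              exact absurd (hnone hn).1 (by simp)

theorem loop_eq (orig : List (List (Int × Int))) (hB : BoundOk orig) :
    ∀ (fuel : Nat) (removed sel : List Int) (active : List (Int × Nat)) (c1 c2 : Int)
      (res : List (Int × Option Int)),
    sel.length = orig.length →
    (∀ x ∈ sel, x = 0 ∨ x = 1) →
    ActRel sel removed orig (List.range orig.length) active →
    (sel.getD c1.toNat 0 = 1 ∨ (c1 = 0 ∧ ∀ x ∈ sel, x = 0)) →
    sel.count 0 + 1 ≤ fuel →
    aLoop fuel sel c1 c2 100000000000 res (orig.map (filt removed)) =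
      bLoop orig fuel removed active res := by
  intro fuel
  induction fuel with
  | zero =>
    intro removed sel active c1 c2 res _ _ _ _ hfuel
    omega
  | succ fuel ih =>
    intro removed sel active c1 c2 res hlen h01 hact hstale hfuel
    by_cases hz : ∃ i, i < sel.length ∧ sel.getD i 0 = 0
    case neg =>
      have hsum : ¬ sel.sum < (sel.length : Int) := by
        rw [sum01_lt_iff sel h01]; exact hz
      have hact0 : active = [] := ActRel_nil_of_selected hact (fun i hi h0 =>
        hz ⟨i, by rw [hlen]; exact List.mem_range.mp hi, h0⟩)
      simp only [aLoop, bLoop]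
      rw [if_neg (by rw [List.length_map, ← hlen]; exact hsum), hact0]
      rfl
    case pos =>
      obtain ⟨i0, hi0, hz0⟩ := hz
      have hsum : sel.sum < (sel.length : Int) := (sum01_lt_iff sel h01).mpr ⟨i0, hi0, hz0⟩
      have hane : active ≠ [] :=
        ActRel_ne_nil hact (List.mem_range.mpr (by omega)) hz0
      have hemp : active.isEmpty = false := by
        cases active with
        | nil => exact absurd rfl hane
        | cons a l => rfl
      have hcnt1 : 1 ≤ sel.count 0 := count0_pos sel i0 hi0 hz0
      have hP := pass_eq orig removed hB (List.range orig.length) active sel c1 c2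
        100000000000 res [] none List.nodup_range (fun i hi => List.mem_range.mp hi)
        hlen h01 hact rfl
      unfold PassConcl at hP
      obtain ⟨hres, ⟨k', hk1, hk2⟩, hbr, hlenA, hout, h01A, hcntA, hnone⟩ := hP
      simp only [aLoop, bLoop]
      rw [if_pos (by rw [List.length_map, ← hlen]; exact hsum), hlen, hemp]
      simp only [Bool.false_eq_true, if_false]
      cases hbest : (active.foldl (bStep orig removed) ([], none, res)).2.1 with
      | none =>
        obtain ⟨hb0, hc1, hc2, hd, hall⟩ := hnone hbest
        have hnz : ∀ j, j < orig.length →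
            (List.foldl (aPass (orig.map (filt removed))) (sel, c1, c2, 100000000000, res) (List.range orig.length)).1.getD j 0 ≠ 0 :=
          fun j hj => hall j (List.mem_range.mpr hj)
        -- A's check `selected[center1] == 0` fails: center1 is stale (already marked)
        have hc1nz : ¬ (((List.foldl (aPass (orig.map (filt removed))) (sel, c1, c2, 100000000000, res) (List.range orig.length)).1.getD (List.foldl (aPass (orig.map (filt removed))) (sel, c1, c2, 100000000000, res) (List.range orig.length)).2.1.toNat 0 == 0) = true) := by
          simp only [beq_iff_eq]
          have hidx : (List.foldl (aPass (orig.map (filt removed))) (sel, c1, c2, 100000000000, res) (List.range orig.length)).2.1.toNat = c1.toNat := by rw [hc1]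
          rw [hidx]
          rcases hstale with h1 | ⟨hc10, _⟩
          · by_cases hcb : c1.toNat < orig.length
            · exact hnz _ hcb
            · rw [hout _ (by simpa [List.mem_range] using hcb), h1]
              omega
          · have h0' : c1.toNat = 0 := by rw [hc10]; rfl
            rw [h0']
            exact hnz 0 (by omega)
        rw [if_neg hc1nz]
        have hnz' : ¬ ((List.foldl (aPass (orig.map (filt removed))) (sel, c1, c2, 100000000000, res) (List.range orig.length)).1.sum < (((orig.map (filt removed))).length : Int)) := by
          rw [List.length_map]
          intro hlt
          have hlt' : (List.foldl (aPass (orig.map (filt removed))) (sel, c1, c2, 100000000000, res) (List.range orig.length)).1.sum < ((List.foldl (aPass (orig.map (filt removed))) (sel, c1, c2, 100000000000, res) (List.range orig.length)).1.length : Int) := by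
            rw [hlenA, hlen]
            exact hlt
          obtain ⟨j, hj, hjz⟩ := (sum01_lt_iff _ h01A).mp hlt'
          have hjlt : j < orig.length := by
            have : (List.foldl (aPass (orig.map (filt removed))) (sel, c1, c2, 100000000000, res) (List.range orig.length)).1.length = orig.length := by rw [hlenA, hlen]
            omega
          exact hnz j hjlt hjz
        cases fuel with
        | zero => omega
        | succ f =>
          simp only [aLoop]
          rw [if_neg hnz']
          exact hres
      | some b =>
        have hbr' := hbest ▸ hbr
        obtain ⟨j, e1, e2, _, e4, e5⟩ := hbr'
        have hjsel : j < (List.foldl (aPass (orig.map (filt removed))) (sel, c1, c2, 100000000000, res) (List.range orig.length)).1.length := by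
          omega
        have hcz : (((List.foldl (aPass (orig.map (filt removed))) (sel, c1, c2, 100000000000, res) (List.range orig.length)).1.getD (List.foldl (aPass (orig.map (filt removed))) (sel, c1, c2, 100000000000, res) (List.range orig.length)).2.1.toNat 0 == 0) = true) := by
          rw [e1]
          simp only [Int.toNat_natCast, beq_iff_eq]
          exact e4
        rw [if_pos hcz, removeCenter_filt]
        have hk1' : (active.foldl (bStep orig removed) ([], none, res)).1 = k' := by
          rw [hk1]
          rfl
        rw [ih (PySem.Set.add removed (List.foldl (aPass (orig.map (filt removed))) (sel, c1, c2, 100000000000, res) (List.range orig.length)).2.2.1)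
            ((List.foldl (aPass (orig.map (filt removed))) (sel, c1, c2, 100000000000, res) (List.range orig.length)).1.set (List.foldl (aPass (orig.map (filt removed))) (sel, c1, c2, 100000000000, res) (List.range orig.length)).2.1.toNat 1)
            (List.filter (fun ip => ip.1 != (List.foldl (aPass (orig.map (filt removed))) (sel, c1, c2, 100000000000, res) (List.range orig.length)).2.1) (active.foldl (bStep orig removed) ([], none, res)).1)
            (List.foldl (aPass (orig.map (filt removed))) (sel, c1, c2, 100000000000, res) (List.range orig.length)).2.1 (List.foldl (aPass (orig.map (filt removed))) (sel, c1, c2, 100000000000, res) (List.range orig.length)).2.2.1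
            ((List.foldl (aPass (orig.map (filt removed))) (sel, c1, c2, 100000000000, res) (List.range orig.length)).2.2.2.2 ++ [((List.foldl (aPass (orig.map (filt removed))) (sel, c1, c2, 100000000000, res) (List.range orig.length)).2.1, some (List.foldl (aPass (orig.map (filt removed))) (sel, c1, c2, 100000000000, res) (List.range orig.length)).2.2.1)])
            (by simp [hlenA, hlen])
            (by
              intro x hx
              rcases List.mem_or_eq_of_mem_set hx with h | h
              · exact h01A x h
              · exact Or.inr h)
            (by
              have hidx2 : (List.foldl (aPass (orig.map (filt removed))) (sel, c1, c2, 100000000000, res) (List.range orig.length)).2.1.toNat = j := by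
                rw [e1]
                exact Int.toNat_natCast j
              rw [hk1', hidx2, e1]
              exact ActRel_mono (fun x hx => contains_add_mono removed (List.foldl (aPass (orig.map (filt removed))) (sel, c1, c2, 100000000000, res) (List.range orig.length)).2.2.1 x hx)
                (ActRel_set_filter j (by omega) hk2))
            (by
              left
              rw [e1]
              simp only [Int.toNat_natCast]
              rw [getD_set_self _ _ _ hjsel])
            (by
              rw [e1]
              simp only [Int.toNat_natCast]
              have hset := count0_set _ j hjsel e4
              omega)]
        rw [hres, e5]

theorem dom_bound (c_prefs : List (List (Int × Int))) (h : Dom_matchClosestCenters c_prefs) :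
    BoundOk c_prefs := by
  unfold Dom_matchClosestCenters at h
  rw [List.all_eq_true] at h
  intro l hl a ha
  have h2 := h l hl
  rw [List.all_eq_true] at h2
  have h3 := h2 a ha
  simp only [Bool.and_eq_true, pvDomInt, decide_eq_true_eq] at h3
  omega

-- ===== VERDICT (by name: the statement is the Claim_ definition above) =====
theorem matchClosestCenters_spec : Claim_equal_matchClosestCenters := by
  intro cp hDom
  unfold Spec_matchClosestCenters matchClosestCenters matchClosestCenters_alt
  have hb := loop_eq cp (dom_bound cp hDom) (cp.length + 1) [] (List.replicate cp.length 0)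
      ((List.range cp.length).map (fun i => ((i : Int), (0 : Nat)))) 0 0 []
      (by simp)
      (by intro x hx; exact Or.inl (List.eq_of_mem_replicate hx))
      (by
        apply ActRel_init
        intro i _
        simp [List.getD])
      (Or.inr ⟨rfl, fun x hx => List.eq_of_mem_replicate hx⟩)
      (by simp)
  rw [map_filt_nil] at hb
  simpa using hb
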